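-- pv_equiv track=rewrite | github.com/DarkR0ne/Avdeenko | 23/11.py | f
-- ===== SOURCE A (Python) =====
-- def f(c, e, flag=False, flag1=True, flag2=True):
--     if c == 8:
--         flag = True
--     if c == 11:
--         flag1 = False
--     if c == 18:
--         flag2 = False
--     if c == e:
--         return flag and flag1 and flag2
--     if c > e:
--         return 0
--     if c < e:
--         return f(c + 1, e, flag, flag1, flag2) + f(c + 2, e, flag, flag1, flag2) + f(c * 3, e, flag, flag1, flag2)
-- ===== SOURCE B (Python) =====
-- # Bottom-up dynamic programming over (position, flag-state) instead of the
-- # original three-way recursion: one table pass from e down to c.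
-- def f(c, e, flag=False, flag1=True, flag2=True):
--     def upd(p, s):
--         return (s[0] or p == 8, s[1] and p != 11, s[2] and p != 18)
--
--     s0 = upd(c, (flag, flag1, flag2))
--     if c == e:
--         return s0[0] and s0[1] and s0[2]
--     if c > e:
--         return 0
--     states = [(a, b, d) for a in (False, True) for b in (False, True) for d in (False, True)]
--     table = {}
--     pos = e
--     while pos > c:
--         for s in states:
--             if pos == e:
--                 table[(pos, s)] = 1 if (s[0] and s[1] and s[2]) else 0
--             else:
--                 total = 0
--                 for nxt in (pos + 1, pos + 2, pos * 3):
--                     if nxt <= e: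
--                         total += table[(nxt, upd(nxt, s))]
--                 table[(pos, s)] = total
--         pos -= 1
--     total = 0
--     for nxt in (c + 1, c + 2, c * 3):
--         if nxt <= e:
--             total += table[(nxt, upd(nxt, s0))]
--     return total
-- ===== Notes on version B (the rewrite author's own statement) =====
-- stated objective: alternative
-- what changed: Replaces A's three-way recursion by a bottom-up dynamic-programming table over (position, flag-state) built in one pass from e down to c. Pre_ excludes c = e, where both programs return a bool instead of an int, and c <= 0 < e, where A's recursion never terminates.
-- outside the precondition, e.g. on f(0, 0, True, True, True): A returns True, B returns True; on f(3, 3, False, True, True): A returns False, B returns False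
import Mathlib
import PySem

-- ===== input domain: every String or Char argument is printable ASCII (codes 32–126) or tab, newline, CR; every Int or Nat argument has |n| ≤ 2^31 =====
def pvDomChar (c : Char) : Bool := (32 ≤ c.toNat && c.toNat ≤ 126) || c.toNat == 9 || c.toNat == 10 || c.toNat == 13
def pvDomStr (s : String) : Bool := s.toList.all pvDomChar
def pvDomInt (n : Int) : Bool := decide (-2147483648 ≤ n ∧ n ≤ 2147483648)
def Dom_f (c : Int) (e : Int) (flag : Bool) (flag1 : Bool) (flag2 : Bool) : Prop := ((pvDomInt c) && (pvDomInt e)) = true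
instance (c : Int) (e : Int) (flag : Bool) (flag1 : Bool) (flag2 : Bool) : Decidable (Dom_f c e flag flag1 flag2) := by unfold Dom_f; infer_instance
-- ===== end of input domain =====

-- B replaces A's three-way recursion by a bottom-up DP table over
-- (position, flag-state); equivalence proved on Pre_f (where A's recursion terminates).


-- ===== PORT A =====
-- literal transliteration of A's recursion; the fuel argument only makes the
-- recursion structural (it is large enough on every input admitted by Pre_f)
def fARec : Nat → Int → Int → Bool → Bool → Bool → Int
  | 0, _, _, _, _, _ => 0
  | n + 1, c, e, flag, flag1, flag2 =>
    let flag := if c = 8 then true else flag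
    let flag1 := if c = 11 then false else flag1
    let flag2 := if c = 18 then false else flag2
    if c = e then (if flag && flag1 && flag2 then 1 else 0)
    else if c > e then 0
    else fARec n (c + 1) e flag flag1 flag2 + fARec n (c + 2) e flag flag1 flag2
         + fARec n (c * 3) e flag flag1 flag2

def f (c : Int) (e : Int) (flag : Bool) (flag1 : Bool) (flag2 : Bool) : Int :=
  fARec ((e - c).toNat + 1) c e flag flag1 flag2

-- ===== PORT B =====
-- upd(p, s) of Source B
def fBupd (p : Int) (s : Bool × Bool × Bool) : Bool × Bool × Bool :=
  (s.1 || decide (p = 8), s.2.1 && decide (p ≠ 11), s.2.2 && decide (p ≠ 18))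

-- the 8 flag-states (Source B's `states` comprehension, same order)
def fBstates : List (Bool × Bool × Bool) :=
  [(false, false, false), (false, false, true), (false, true, false), (false, true, true),
   (true, false, false), (true, false, true), (true, true, false), (true, true, true)]

-- body of `table[(pos, s)] = …` for one state s
def fBentry (t : PySem.Dict (Int × (Bool × Bool × Bool)) Int) (e pos : Int)
    (s : Bool × Bool × Bool) : Int :=
  if pos = e then (if s.1 && s.2.1 && s.2.2 then 1 else 0)
  else
    [pos + 1, pos + 2, pos * 3].foldl
      (fun total nxt => if nxt ≤ e then total + t.getD (nxt, fBupd nxt s) 0 else total) 0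

-- one iteration of the while loop (the `for s in states` loop)
def fBstep (t : PySem.Dict (Int × (Bool × Bool × Bool)) Int) (e pos : Int) :
    PySem.Dict (Int × (Bool × Bool × Bool)) Int :=
  fBstates.foldl (fun t' s => t'.insert (pos, s) (fBentry t' e pos s)) t

-- the while loop: n iterations, pos = start, start-1, …
def fBbuild : Nat → Int → Int → PySem.Dict (Int × (Bool × Bool × Bool)) Int →
    PySem.Dict (Int × (Bool × Bool × Bool)) Int
  | 0, _, _, t => t
  | n + 1, pos, e, t => fBbuild n (pos - 1) e (fBstep t e pos)

def f_alt (c : Int) (e : Int) (flag : Bool) (flag1 : Bool) (flag2 : Bool) : Int :=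
  let s0 := fBupd c (flag, flag1, flag2)
  if c = e then (if s0.1 && s0.2.1 && s0.2.2 then 1 else 0)
  else if c > e then 0
  else
    let table := fBbuild (e - c).toNat e e PySem.Dict.empty
    [c + 1, c + 2, c * 3].foldl
      (fun total nxt => if nxt ≤ e then total + table.getD (nxt, fBupd nxt s0) 0 else total) 0

-- ===== PRECONDITION & SPEC =====
-- Pre_f excludes (a) the inputs c ≤ 0 < e, on which A's recursion never terminates
-- (Python RecursionError; B raises KeyError there too), and (b) the inputs with c = e,
-- on which A (and B alike) returns a bool (True/False) instead of an int.
def Pre_f (c : Int) (e : Int) (flag : Bool) (flag1 : Bool) (flag2 : Bool) : Prop :=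
  c ≠ e ∧ (e ≤ c ∨ 1 ≤ c)
instance (c : Int) (e : Int) (flag : Bool) (flag1 : Bool) (flag2 : Bool) : Decidable (Pre_f c e flag flag1 flag2) := by unfold Pre_f; infer_instance

def pvWitness_f : Int × Int × Bool × Bool × Bool := (1, 10, false, true, true)

def Spec_f (c : Int) (e : Int) (flag : Bool) (flag1 : Bool) (flag2 : Bool) (out : Int) : Prop := out = f_alt c e flag flag1 flag2
instance (c : Int) (e : Int) (flag : Bool) (flag1 : Bool) (flag2 : Bool) (out : Int) : Decidable (Spec_f c e flag flag1 flag2 out) := by unfold Spec_f; infer_instance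

-- ===== CLAIM (what is proved, stated in full; the proofs are below) =====
def Claim_equal_f : Prop := ∀ (c : Int) (e : Int) (flag : Bool) (flag1 : Bool) (flag2 : Bool), Dom_f c e flag flag1 flag2 → Pre_f c e flag flag1 flag2 → Spec_f c e flag flag1 flag2 (f c e flag flag1 flag2)

-- ===== LEMMAS AND PROOFS =====

-- fuel irrelevance for A's recursion: any fuel above the depth gives the same value
theorem fARec_fuel (n : Nat) : ∀ (m : Nat) (c e : Int) (fl f1 f2 : Bool),
    1 ≤ c → (e - c).toNat < n → (e - c).toNat < m →
    fARec n c e fl f1 f2 = fARec m c e fl f1 f2 := by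
  induction n with
  | zero => intro m c e fl f1 f2 _ h _; omega
  | succ n ih =>
    intro m c e fl f1 f2 hc hn hm
    cases m with
    | zero => omega
    | succ m =>
      simp only [fARec]
      by_cases h1 : c = e
      · simp [h1]
      · by_cases h2 : c > e
        · simp [h1, h2]
        · have hce : c < e := by omega
          simp only [if_neg h1, if_neg h2]
          rw [ih m (c + 1) e _ _ _ (by omega) (by omega) (by omega),
              ih m (c + 2) e _ _ _ (by omega) (by omega) (by omega),
              ih m (c * 3) e _ _ _ (by omega) (by omega) (by omega)]

theorem mem_fBstates (s : Bool × Bool × Bool) : s ∈ fBstates := by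
  obtain ⟨a, b, d⟩ := s
  cases a <;> cases b <;> cases d <;> simp [fBstates]

-- lookups in fBstep at a first component ≠ pos fall through to t
theorem fBstep_getD_ne (t : PySem.Dict (Int × (Bool × Bool × Bool)) Int) (e pos : Int)
    (q : Int) (s : Bool × Bool × Bool) (hq : q ≠ pos) :
    (fBstep t e pos).getD (q, s) 0 = t.getD (q, s) 0 := by
  simp only [fBstep]
  induction fBstates generalizing t with
  | nil => rfl
  | cons x xs ih =>
    simp only [List.foldl_cons]
    rw [ih]
    rw [PySem.Dict.getD_insert]
    simp [hq]

-- the entry fBstep writes for state s, when entry computations never read keys at pos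
theorem fBstep_getD_self (t : PySem.Dict (Int × (Bool × Bool × Bool)) Int) (e pos : Int)
    (hpos : 1 ≤ pos) (s : Bool × Bool × Bool) :
    (fBstep t e pos).getD (pos, s) 0 = fBentry t e pos s := by
  -- fBentry only reads keys (nxt, _) with nxt > pos, so inserting at pos does not change it
  have hent : ∀ (t' : PySem.Dict (Int × (Bool × Bool × Bool)) Int),
      (∀ q s', q ≠ pos → t'.getD (q, s') 0 = t.getD (q, s') 0) →
      ∀ s', fBentry t' e pos s' = fBentry t e pos s' := by
    intro t' ht' s'
    simp only [fBentry]
    by_cases hpe : pos = e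
    · simp [hpe]
    · simp only [if_neg hpe, List.foldl_cons, List.foldl_nil]
      rw [ht' (pos + 1) _ (by omega), ht' (pos + 2) _ (by omega), ht' (pos * 3) _ (by omega)]
  -- fold invariant over the states list
  suffices h : ∀ (l : List (Bool × Bool × Bool)) (t' : PySem.Dict (Int × (Bool × Bool × Bool)) Int),
      (∀ q s', q ≠ pos → t'.getD (q, s') 0 = t.getD (q, s') 0) →
      (t'.getD (pos, s) 0 = fBentry t e pos s ∨ s ∈ l) →
      (l.foldl (fun t'' s' => t''.insert (pos, s') (fBentry t'' e pos s')) t').getD (pos, s) 0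
        = fBentry t e pos s by
    exact h fBstates t (fun _ _ _ => rfl) (Or.inr (mem_fBstates s))
  intro l
  induction l with
  | nil =>
    intro t' ht' hs
    simp only [List.foldl_nil]
    rcases hs with h | h
    · exact h
    · simp at h
  | cons x xs ih =>
    intro t' ht' hs
    simp only [List.foldl_cons]
    apply ih
    · intro q s' hq; rw [PySem.Dict.getD_insert]; simp [hq]; exact ht' q s' hq
    · by_cases hx : s = x
      · left; rw [PySem.Dict.getD_insert]; simp [hx]; rw [hent t' ht' x]
      · rcases hs with h | h
        · left; rw [PySem.Dict.getD_insert]; simp [Prod.ext_iff, hx]; exact h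
        · right; simp [hx] at h; exact h

-- peeling the LAST iteration off the while loop
theorem fBbuild_succ (e : Int) (k : Nat) : ∀ (p : Int) (t : PySem.Dict (Int × (Bool × Bool × Bool)) Int),
    fBbuild (k + 1) p e t = fBstep (fBbuild k p e t) e (p - k) := by
  induction k with
  | zero => intro p t; simp [fBbuild]
  | succ k ih =>
    intro p t
    show fBbuild (k + 1) (p - 1) e (fBstep t e p) = _
    rw [ih (p - 1) (fBstep t e p)]
    have : (p : Int) - 1 - k = p - (k + 1 : Nat) := by push_cast; ring
    rw [this]
    rfl

-- main invariant: after k iterations from e, every looked-up key of the form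
-- (pos, upd pos s) with e - k < pos ≤ e holds A's value at pos
theorem fBbuild_invariant (e : Int) (k : Nat) (hk : 1 ≤ e - k) :
    ∀ (pos : Int) (fl f1 f2 : Bool), e - k < pos → pos ≤ e →
      (fBbuild k e e PySem.Dict.empty).getD (pos, fBupd pos (fl, f1, f2)) 0
        = fARec ((e - pos).toNat + 1) pos e fl f1 f2 := by
  induction k with
  | zero => intro pos fl f1 f2 h1 h2; omega
  | succ k ih =>
    have hk' : 1 ≤ e - (k : Int) := by push_cast at hk ⊢; omega
    intro pos fl f1 f2 h1 h2
    rw [fBbuild_succ]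
    by_cases hp : pos = e - k
    · -- the freshly written row
      subst hp
      rw [fBstep_getD_self _ _ _ (by omega)]
      simp only [fBentry]
      by_cases hpe : e - (k : Int) = e
      · -- pos = e : base row
        rw [hpe, if_pos rfl]
        have h0 : (e - e).toNat = 0 := by omega
        rw [h0]
        simp only [fARec, fBupd]
        by_cases h8 : e = 8 <;> by_cases h11 : e = 11 <;> by_cases h18 : e = 18 <;>
          simp [h8, h11, h18]
      · -- interior row: sum over children
        have hlt : e - (k : Int) < e := by omega
        simp only [if_neg hpe, List.foldl_cons, List.foldl_nil]
        set p := e - (k : Int) with hpdef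
        set s := fBupd p (fl, f1, f2) with hsdef
        -- children values from ih (when ≤ e), with fuel adjusted
        have hchild : ∀ nxt : Int, p < nxt → nxt ≤ e →
            (fBbuild k e e PySem.Dict.empty).getD (nxt, fBupd nxt s) 0
              = fARec ((e - p).toNat) nxt e s.1 s.2.1 s.2.2 := by
          intro nxt hn1 hn2
          have hih := ih (by omega) nxt s.1 s.2.1 s.2.2 (by omega) hn2
          simp only [Prod.mk.eta] at hih
          rw [hih]
          exact fARec_fuel _ _ nxt e _ _ _ (by omega) (by omega) (by omega)
        -- A's value at p, one unfolding
        have hA : fARec ((e - p).toNat + 1) p e fl f1 f2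
            = fARec ((e - p).toNat) (p + 1) e s.1 s.2.1 s.2.2
              + fARec ((e - p).toNat) (p + 2) e s.1 s.2.1 s.2.2
              + fARec ((e - p).toNat) (p * 3) e s.1 s.2.1 s.2.2 := by
          simp only [fARec, if_neg hpe, if_neg (by omega : ¬ p > e), hsdef, fBupd]
          by_cases h8 : p = 8 <;> by_cases h11 : p = 11 <;> by_cases h18 : p = 18 <;>
            simp [h8, h11, h18]
        rw [hA]
        have hzero : ∀ nxt : Int, e < nxt → fARec ((e - p).toNat) nxt e s.1 s.2.1 s.2.2 = 0 := by
          intro nxt hn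
          have : 1 ≤ (e - p).toNat := by omega
          obtain ⟨m, hm⟩ : ∃ m, (e - p).toNat = m + 1 := ⟨(e - p).toNat - 1, by omega⟩
          rw [hm]
          simp only [fARec]
          rw [if_neg (by omega), if_pos (by omega)]
        have h1le : p + 1 ≤ e := by omega
        rw [if_pos h1le]
        rw [hchild (p + 1) (by omega) h1le]
        by_cases h2le : p + 2 ≤ e
        · rw [if_pos h2le, hchild (p + 2) (by omega) h2le]
          by_cases h3le : p * 3 ≤ e
          · rw [if_pos h3le, hchild (p * 3) (by omega) h3le]; ring
          · rw [if_neg h3le, hzero (p * 3) (by omega)]; ring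
        · rw [if_neg h2le, hzero (p + 2) (by omega)]
          by_cases h3le : p * 3 ≤ e
          · rw [if_pos h3le, hchild (p * 3) (by omega) h3le]; ring
          · rw [if_neg h3le, hzero (p * 3) (by omega)]; ring
    · -- older rows: fall through the step, use ih
      rw [fBstep_getD_ne _ _ _ _ _ (by omega)]
      exact ih (by omega) pos fl f1 f2 (by omega) h2

-- ===== VERDICT (by name: the statement is the Claim_ definition above) =====
theorem f_spec : Claim_equal_f := by
  unfold Claim_equal_f
  intro c e flag flag1 flag2 _ hpre
  unfold Spec_f f f_alt
  obtain ⟨hce, hpre⟩ := hpre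
  · by_cases hgt : c > e
    · have h0 : (e - c).toNat = 0 := by omega
      simp [fARec, hce, hgt]
    · -- c < e, and by Pre_f then 1 ≤ c
      have hce' : c < e := by omega
      have hc1 : 1 ≤ c := by
        rcases hpre with h | h
        · omega
        · exact h
      simp only [if_neg hce, if_neg hgt]
      set s0 := fBupd c (flag, flag1, flag2) with hs0
      have hA : fARec ((e - c).toNat + 1) c e flag flag1 flag2
          = fARec ((e - c).toNat) (c + 1) e s0.1 s0.2.1 s0.2.2
            + fARec ((e - c).toNat) (c + 2) e s0.1 s0.2.1 s0.2.2
            + fARec ((e - c).toNat) (c * 3) e s0.1 s0.2.1 s0.2.2 := by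
        simp only [fARec, if_neg hce, if_neg hgt, hs0, fBupd]
        by_cases h8 : c = 8 <;> by_cases h11 : c = 11 <;> by_cases h18 : c = 18 <;>
          simp [h8, h11, h18]
      rw [hA]
      have hchild : ∀ nxt : Int, c < nxt → nxt ≤ e →
          (fBbuild (e - c).toNat e e PySem.Dict.empty).getD (nxt, fBupd nxt s0) 0
            = fARec ((e - c).toNat) nxt e s0.1 s0.2.1 s0.2.2 := by
        intro nxt hn1 hn2
        have hih := fBbuild_invariant e (e - c).toNat (by omega) nxt s0.1 s0.2.1 s0.2.2 (by omega) hn2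
        simp only [Prod.mk.eta] at hih
        rw [hih]
        exact fARec_fuel _ _ nxt e _ _ _ (by omega) (by omega) (by omega)
      have hzero : ∀ nxt : Int, e < nxt → fARec ((e - c).toNat) nxt e s0.1 s0.2.1 s0.2.2 = 0 := by
        intro nxt hn
        obtain ⟨m, hm⟩ : ∃ m, (e - c).toNat = m + 1 := ⟨(e - c).toNat - 1, by omega⟩
        rw [hm]
        simp only [fARec]
        rw [if_neg (by omega), if_pos (by omega)]
      simp only [List.foldl_cons, List.foldl_nil]
      have h1le : c + 1 ≤ e := by omega
      rw [if_pos h1le, hchild (c + 1) (by omega) h1le]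
      by_cases h2le : c + 2 ≤ e
      · rw [if_pos h2le, hchild (c + 2) (by omega) h2le]
        by_cases h3le : c * 3 ≤ e
        · rw [if_pos h3le, hchild (c * 3) (by omega) h3le]; ring
        · rw [if_neg h3le, hzero (c * 3) (by omega)]; ring
      · rw [if_neg h2le, hzero (c + 2) (by omega)]
        by_cases h3le : c * 3 ≤ e
        · rw [if_pos h3le, hchild (c * 3) (by omega) h3le]; ring
        · rw [if_neg h3le, hzero (c * 3) (by omega)]; ring
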